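-- pv_equiv track=rewrite | github.com/Tianyou-Luo-Michael/EC523-project | training/data/preprocess/resplit_curated_co3d.py | take_sequences
-- ===== SOURCE A (Python) =====
-- def take_sequences(
--     desired_count: int,
--     priority_groups: list[list[str]],
-- ) -> list[str]:
--     selected: list[str] = []
--     seen: set[str] = set()
--     for group in priority_groups:
--         for seq_name in group:
--             if seq_name in seen:
--                 continue
--             selected.append(seq_name)
--             seen.add(seq_name)
--             if len(selected) >= desired_count:
--                 return selected
--     return selected
-- ===== SOURCE B (Python) =====
-- def take_sequences(
--     desired_count: int,
--     priority_groups: list[list[str]],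
-- ) -> list[str]:
--     if desired_count <= 0:
--         return []
--     first_pos = {}
--     index = 0
--     for group in priority_groups:
--         for name in group:
--             first_pos.setdefault(name, index)
--             index += 1
--     ranked = sorted(first_pos, key=first_pos.get)
--     return ranked[:desired_count]
-- ===== Notes on version B (the rewrite author's own statement) =====
-- stated objective: alternative
-- what changed: Instead of streaming names through a seen-set with incremental appends and an early return, B records each name's first flattened position in one indexing pass, ranks the names by sorting on that position, and slices the ranking.
-- intended difference: When desired_count <= 0 and the groups contain at least one name, A still returns a one-element list because it checks the length only after appending, while B returns the empty list, which is the intended result when zero or fewer sequences are requested. — e.g. on take_sequences(0, [["a"]]): A returns ["a"], B returns []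
import Mathlib
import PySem

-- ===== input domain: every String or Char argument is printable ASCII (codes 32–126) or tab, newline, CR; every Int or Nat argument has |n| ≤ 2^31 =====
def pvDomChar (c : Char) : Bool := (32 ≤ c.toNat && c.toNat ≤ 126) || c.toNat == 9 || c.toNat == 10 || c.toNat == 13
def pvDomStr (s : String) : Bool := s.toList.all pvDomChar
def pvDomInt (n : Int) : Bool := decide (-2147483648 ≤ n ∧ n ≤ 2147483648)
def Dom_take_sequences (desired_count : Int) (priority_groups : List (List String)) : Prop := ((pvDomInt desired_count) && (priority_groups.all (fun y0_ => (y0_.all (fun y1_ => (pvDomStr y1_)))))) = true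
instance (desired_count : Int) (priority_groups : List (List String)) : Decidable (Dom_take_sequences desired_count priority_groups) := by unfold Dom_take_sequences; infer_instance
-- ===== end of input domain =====

-- ===== PORT A =====
-- B ranks names by their first flattened position instead of streaming with an early
-- return; on desired_count ≤ 0 with names present A returns one name, B none (see D_).

-- inner 'for seq_name in group' loop; .inr = early 'return selected', .inl = fall through
def take_sequences.goSeq (desired_count : Int) (names : List String)
    (selected : List String) (seen : PySem.Set String) :
    (List String × PySem.Set String) ⊕ List String :=
  match names with
  | [] => .inl (selected, seen)
  | seq_name :: rest =>
    if PySem.Set.contains seen seq_name then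
      take_sequences.goSeq desired_count rest selected seen
    else
      let selected' := selected ++ [seq_name]
      let seen' := PySem.Set.add seen seq_name
      if desired_count ≤ (selected'.length : Int) then .inr selected'
      else take_sequences.goSeq desired_count rest selected' seen'

-- outer 'for group in priority_groups' loop
def take_sequences.goGroups (desired_count : Int) (groups : List (List String))
    (selected : List String) (seen : PySem.Set String) : List String :=
  match groups with
  | [] => selected
  | group :: gs =>
    match take_sequences.goSeq desired_count group selected seen with
    | .inr r => r
    | .inl (sel, sn) => take_sequences.goGroups desired_count gs sel sn

def take_sequences (desired_count : Int) (priority_groups : List (List String)) : List String :=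
  take_sequences.goGroups desired_count priority_groups [] PySem.Set.empty

-- ===== PORT B =====
-- first_pos.setdefault(name, index); index += 1  — folded over the nested loops
def take_sequences_alt (desired_count : Int) (priority_groups : List (List String)) : List String :=
  if desired_count ≤ 0 then []
  else
    let st := priority_groups.foldl (fun st group =>
        group.foldl (fun (st : PySem.Dict String Int × Int) name =>
          (st.1.setdefault name st.2, st.2 + 1)) st)
      (PySem.Dict.empty, (0 : Int))
    -- sorted(first_pos, key=first_pos.get): every key is present, so .get returns its
    -- int position; getD _ 0 is exact here
    let ranked := PySem.List.sorted st.1.keys (fun n => st.1.getD n 0) false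
    PySem.List.slice ranked none (some desired_count)

-- ===== PRECONDITION & SPEC =====
-- When desired_count ≤ 0 and the groups contain at least one name, A still returns a
-- one-element list (it checks the length only after appending), while B returns [],
-- the intended result when zero or fewer sequences are requested.
def D_take_sequences (desired_count : Int) (priority_groups : List (List String)) : Prop :=
  desired_count ≤ 0 ∧ priority_groups.flatten ≠ []
instance (desired_count : Int) (priority_groups : List (List String)) : Decidable (D_take_sequences desired_count priority_groups) := by unfold D_take_sequences; infer_instance

def Spec_take_sequences (desired_count : Int) (priority_groups : List (List String)) (out : List String) : Prop := ¬ D_take_sequences desired_count priority_groups → out = take_sequences_alt desired_count priority_groups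
instance (desired_count : Int) (priority_groups : List (List String)) (out : List String) : Decidable (Spec_take_sequences desired_count priority_groups out) := by unfold Spec_take_sequences; infer_instance

def pvDiffWitness_take_sequences : Int × List (List String) := (0, [["a"]])
def pvDiffWitnessOut_take_sequences : (List String) × (List String) := (["a"], [])

-- ===== CLAIM (what is proved, stated in full; the proofs are below) =====
def Claim_unchanged_take_sequences : Prop := ∀ (desired_count : Int) (priority_groups : List (List String)), Dom_take_sequences desired_count priority_groups → Spec_take_sequences desired_count priority_groups (take_sequences desired_count priority_groups)
def Claim_changed_take_sequences : Prop := Dom_take_sequences (pvDiffWitness_take_sequences.1) (pvDiffWitness_take_sequences.2) ∧ D_take_sequences (pvDiffWitness_take_sequences.1) (pvDiffWitness_take_sequences.2) ∧ take_sequences (pvDiffWitness_take_sequences.1) (pvDiffWitness_take_sequences.2) = pvDiffWitnessOut_take_sequences.1 ∧ take_sequences_alt (pvDiffWitness_take_sequences.1) (pvDiffWitness_take_sequences.2) = pvDiffWitnessOut_take_sequences.2 ∧ pvDiffWitnessOut_take_sequences.1 ≠ pvDiffWitnessOut_take_sequences.2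
def Claim_exact_take_sequences : Prop := ∀ (desired_count : Int) (priority_groups : List (List String)), Dom_take_sequences desired_count priority_groups → D_take_sequences desired_count priority_groups → take_sequences desired_count priority_groups ≠ take_sequences_alt desired_count priority_groups

-- ===== LEMMAS AND PROOFS =====

-- proof-side: A's two loops fused into one loop over the flattened name list
def goFlat (d : Int) : List String → List String → List String
  | [], sel => sel
  | n :: rest, sel =>
    if sel.contains n then goFlat d rest sel
    else if d ≤ ((sel.length : Int) + 1) then sel ++ [n]
    else goFlat d rest (sel ++ [n])

-- proof-side: the distinct elements of a list that are not already in sel, in order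
def dedupFrom (sel : List String) : List String → List String
  | [] => []
  | n :: rest => if sel.contains n then dedupFrom sel rest else n :: dedupFrom (sel ++ [n]) rest

theorem goSeq_flat (d : Int) (names : List String) : ∀ (sel rest : List String),
    (∃ s, take_sequences.goSeq d names sel sel = .inl (s, s) ∧
          goFlat d (names ++ rest) sel = goFlat d rest s) ∨
    (∃ r, take_sequences.goSeq d names sel sel = .inr r ∧ goFlat d (names ++ rest) sel = r) := by
  induction names with
  | nil => intro sel rest; exact .inl ⟨sel, rfl, rfl⟩
  | cons n ns ih =>
    intro sel rest
    by_cases h : n ∈ sel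
    · simp only [take_sequences.goSeq, goFlat, PySem.Set.contains,
        List.contains_eq_mem, h, decide_true, if_true, List.cons_append]
      simpa [goFlat, h] using ih sel rest
    · by_cases h2 : d ≤ ((sel.length : Int) + 1)
      · exact .inr ⟨sel ++ [n],
          by simp [take_sequences.goSeq, PySem.Set.contains, h, h2],
          by simp [goFlat, h, h2]⟩
      · simpa [take_sequences.goSeq, goFlat, PySem.Set.contains, PySem.Set.add, h, h2]
          using ih (sel ++ [n]) rest

theorem goGroups_flat (d : Int) (groups : List (List String)) : ∀ (sel : List String),
    take_sequences.goGroups d groups sel sel = goFlat d groups.flatten sel := by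
  induction groups with
  | nil => intro sel; simp [take_sequences.goGroups, goFlat]
  | cons g gs ih =>
    intro sel
    rcases goSeq_flat d g sel gs.flatten with ⟨s, hq, hf⟩ | ⟨r, hq, hf⟩
    · simp [take_sequences.goGroups, hq, List.flatten, hf, ih s]
    · simp [take_sequences.goGroups, hq, List.flatten, hf]

theorem goFlat_take (d : Int) (names : List String) : ∀ (sel : List String),
    sel.length < (max d 1).toNat →
    goFlat d names sel = sel ++ (dedupFrom sel names).take ((max d 1).toNat - sel.length) := by
  induction names with
  | nil => intro sel _; simp [goFlat, dedupFrom]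
  | cons n ns ih =>
    intro sel hlen
    by_cases h : n ∈ sel
    · simpa [goFlat, dedupFrom, h] using ih sel hlen
    · by_cases h2 : d ≤ ((sel.length : Int) + 1)
      · have hk : (max d 1).toNat - sel.length = 1 := by omega
        simp [goFlat, dedupFrom, h, h2, hk]
      · have hlen' : (sel ++ [n]).length < (max d 1).toNat := by
          simp; omega
        have hk : (max d 1).toNat - sel.length =
            ((max d 1).toNat - (sel ++ [n]).length) + 1 := by simp; omega
        simp only [goFlat, dedupFrom, h2, if_false]
        rw [ih (sel ++ [n]) hlen', hk]
        simp [h]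

-- A's value in closed form
theorem take_sequences_eq_take (d : Int) (pg : List (List String)) :
    take_sequences d pg = (dedupFrom [] pg.flatten).take ((max d 1).toNat) := by
  have hk : (0 : Nat) < (max d 1).toNat := by omega
  have := goFlat_take d pg.flatten [] (by simp only [List.length_nil]; exact hk)
  simpa [take_sequences, PySem.Set.empty, goGroups_flat d pg []] using this

-- B's indexing fold: keys in first-occurrence order, values strictly increasing
theorem build_spec (names : List String) : ∀ (d0 : PySem.Dict String Int) (i0 : Int),
    d0.keys.Nodup → (∀ p ∈ d0.items, p.2 < i0) →
    d0.items.Pairwise (fun p q => p.2 < q.2) →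
    (names.foldl (fun (st : PySem.Dict String Int × Int) name =>
        (st.1.setdefault name st.2, st.2 + 1)) (d0, i0)).1.keys
        = d0.keys ++ dedupFrom d0.keys names ∧
    (names.foldl (fun (st : PySem.Dict String Int × Int) name =>
        (st.1.setdefault name st.2, st.2 + 1)) (d0, i0)).1.keys.Nodup ∧
    (∀ p ∈ (names.foldl (fun (st : PySem.Dict String Int × Int) name =>
        (st.1.setdefault name st.2, st.2 + 1)) (d0, i0)).1.items,
        p.2 < (names.foldl (fun (st : PySem.Dict String Int × Int) name =>
        (st.1.setdefault name st.2, st.2 + 1)) (d0, i0)).2) ∧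
    (names.foldl (fun (st : PySem.Dict String Int × Int) name =>
        (st.1.setdefault name st.2, st.2 + 1)) (d0, i0)).1.items.Pairwise
        (fun p q => p.2 < q.2) := by
  induction names with
  | nil => intro d0 i0 hnd hlt hpw; exact ⟨by simp [dedupFrom], hnd, hlt, hpw⟩
  | cons n ns ih =>
    intro d0 i0 hnd hlt hpw
    by_cases h : d0.contains n = true
    · have hmem : n ∈ d0.keys := (PySem.Dict.contains_iff_mem_keys d0 n).mp h
      have hstep : d0.setdefault n i0 = d0 := PySem.Dict.setdefault_of_contains d0 i0 h
      have := ih d0 (i0 + 1) hnd (fun p hp => by have := hlt p hp; omega) hpw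
      simpa [List.foldl_cons, hstep, dedupFrom, hmem] using this
    · have h' : d0.contains n = false := by simpa using h
      have hnmem : n ∉ d0.keys := fun hm =>
        by simp [(PySem.Dict.contains_iff_mem_keys d0 n).mpr hm] at h'
      have hstep : d0.setdefault n i0 = d0.insert n i0 :=
        PySem.Dict.setdefault_of_not_contains d0 i0 h'
      have hkeys : (d0.insert n i0).keys = d0.keys ++ [n] :=
        PySem.Dict.keys_insert_of_not_contains d0 i0 h'
      have hitems : (d0.insert n i0).items = d0.items ++ [(n, i0)] :=
        PySem.Dict.items_insert_of_not_contains d0 i0 h'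
      have hnd' : (d0.insert n i0).keys.Nodup := by
        rw [hkeys]
        simpa [List.nodup_append] using ⟨hnd, fun a ha (he : a = n) => hnmem (he ▸ ha)⟩
      have hlt' : ∀ p ∈ (d0.insert n i0).items, p.2 < i0 + 1 := by
        intro p hp
        rw [hitems] at hp
        rcases List.mem_append.mp hp with hp | hp
        · have := hlt p hp; omega
        · simp at hp; subst hp; simp
      have hpw' : (d0.insert n i0).items.Pairwise (fun p q => p.2 < q.2) := by
        rw [hitems, List.pairwise_append]
        exact ⟨hpw, by simp, fun p hp q hq => by simp at hq; rw [hq]; exact hlt p hp⟩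
      have := ih (d0.insert n i0) (i0 + 1) hnd' hlt' hpw'
      rw [hkeys] at this
      simpa [List.foldl_cons, hstep, dedupFrom, hnmem, List.append_assoc] using this

-- sorting the keys by recorded position is the identity
theorem sorted_keys_id (dm : PySem.Dict String Int)
    (hnd : dm.keys.Nodup) (hpw : dm.items.Pairwise (fun p q => p.2 < q.2)) :
    PySem.List.sorted dm.keys (fun n => dm.getD n 0) false = dm.keys := by
  apply PySem.List.sorted_eq_self_of_pairwise
  have hk : dm.keys = dm.items.map Prod.fst := by simp [PySem.Dict.keys]
  rw [hk, List.pairwise_map]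
  refine hpw.imp_of_mem ?_
  intro p q hp hq hlt
  obtain ⟨k1, v1⟩ := p
  obtain ⟨k2, v2⟩ := q
  have h1 := PySem.Dict.getD_of_mem_items dm hp hnd 0
  have h2 := PySem.Dict.getD_of_mem_items dm hq hnd 0
  simp only [h1, h2]
  exact le_of_lt hlt

-- B's value in closed form (for 0 < d)
theorem take_sequences_alt_eq_take (d : Int) (pg : List (List String)) (hd : 0 < d) :
    take_sequences_alt d pg = (dedupFrom [] pg.flatten).take d.toNat := by
  obtain ⟨hkeys, hnd, -, hpw⟩ := build_spec pg.flatten PySem.Dict.empty 0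
    (by simp) (by intro p hp; simp [PySem.Dict.empty] at hp)
    (by simp [PySem.Dict.empty])
  simp only [take_sequences_alt, if_neg (by omega : ¬ d ≤ 0)]
  rw [← List.foldl_flatten, sorted_keys_id _ hnd hpw, hkeys,
    PySem.List.slice_to _ (le_of_lt hd)]
  simp [PySem.Dict.keys_empty]

-- a dedup of a nonempty list is nonempty
theorem dedupFrom_nil_ne_nil (l : List String) (h : l ≠ []) : dedupFrom [] l ≠ [] := by
  cases l with
  | nil => exact absurd rfl h
  | cons n rest => simp [dedupFrom]

-- ===== VERDICT (by name: the statement is the Claim_ definition above) =====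
theorem take_sequences_spec : Claim_unchanged_take_sequences := by
  intro d pg _ hnD
  rcases not_and_or.mp hnD with hd | hfl
  · have hd : 0 < d := by omega
    rw [take_sequences_eq_take, take_sequences_alt_eq_take d pg hd]
    congr 1
    omega
  · have hfl : pg.flatten = [] := by
      by_contra hne; exact hfl hne
    by_cases hd : d ≤ 0
    · simp [take_sequences_eq_take, take_sequences_alt, hfl, dedupFrom, hd]
    · rw [take_sequences_eq_take, take_sequences_alt_eq_take d pg (by omega)]
      simp [hfl, dedupFrom]

theorem take_sequences_changed : Claim_changed_take_sequences := by
  unfold Claim_changed_take_sequences; decide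

theorem take_sequences_tight : Claim_exact_take_sequences := by
  intro d pg _ hD
  obtain ⟨hd, hfl⟩ := hD
  have hB : take_sequences_alt d pg = [] := by simp [take_sequences_alt, hd]
  rw [hB, take_sequences_eq_take]
  have h1 : (max d 1).toNat = 1 := by omega
  rw [h1]
  cases h : dedupFrom [] pg.flatten with
  | nil => exact absurd h (dedupFrom_nil_ne_nil _ hfl)
  | cons a t => simp
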